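-- pv_equiv track=rewrite | github.com/1Percent-hub/ScholarHub | chatbot/backend/knowledge_engine.py | score_match_phrase
-- ===== SOURCE A (Python) =====
-- from typing import List, Tuple, Optional
--
-- def score_match_phrase(text: str, keywords: List[str]) -> int:
--     """Original style: bonus when a full keyword phrase appears in text."""
--     if not text or not keywords:
--         return 0
--     score = 0
--     for kw in keywords:
--         if kw.strip() and kw in text:
--             score += 10 + len(kw)
--     return score
-- ===== SOURCE B (Python) =====
-- def score_match_phrase(text, keywords):
--     """Rewrite: one windowing sweep per distinct keyword length builds a set of
--     substrings; each keyword is then scored by a set lookup (no per-keyword scan)."""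
--     if not text or not keywords:
--         return 0
--     lengths = []
--     for kw in keywords:
--         if kw.strip() and len(kw) not in lengths:
--             lengths.append(len(kw))
--     seen = set()
--     for L in lengths:
--         for i in range(len(text) - L + 1):
--             seen.add(text[i:i + L])
--     score = 0
--     for kw in keywords:
--         if kw.strip() and kw in seen:
--             score += 10 + len(kw)
--     return score
-- ===== Notes on version B (the rewrite author's own statement) =====
-- stated objective: faster
-- what changed: A scans the whole text once per keyword ('kw in text'); B makes one windowing sweep of the text per DISTINCT keyword length, collecting all substrings of those lengths into a hash set, and then scores every keyword by a single O(1) set lookup.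
import Mathlib
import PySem

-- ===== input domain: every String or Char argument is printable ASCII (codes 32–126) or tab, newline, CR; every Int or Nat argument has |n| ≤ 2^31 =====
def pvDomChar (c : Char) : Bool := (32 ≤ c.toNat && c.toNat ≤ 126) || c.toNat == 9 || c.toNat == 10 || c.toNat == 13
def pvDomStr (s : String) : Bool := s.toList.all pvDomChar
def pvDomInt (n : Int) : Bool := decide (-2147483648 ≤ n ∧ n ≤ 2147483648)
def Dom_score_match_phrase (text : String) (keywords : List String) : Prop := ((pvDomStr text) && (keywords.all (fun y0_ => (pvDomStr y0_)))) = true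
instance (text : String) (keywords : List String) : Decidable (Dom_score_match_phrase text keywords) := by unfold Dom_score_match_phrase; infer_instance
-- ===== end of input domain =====

-- B replaces A's per-keyword substring scan by one windowing sweep of the text per
-- distinct keyword length that fills a set, then scores each keyword by a set lookup
-- (objective: faster — one text sweep per distinct length instead of per keyword; measured faster in a timing run).

-- ===== PORT A =====
-- literal port of A: early return 0 on empty text/keywords, then one loop over
-- keywords testing 'kw.strip() and kw in text'
def score_match_phrase (text : String) (keywords : List String) : Int :=
  if text = "" ∨ keywords = [] then 0
  else
    keywords.foldl
      (fun score kw =>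
        if PySem.Str.strip kw ≠ "" ∧ PySem.Str.isIn kw text = true then
          score + (10 + PySem.Str.len kw)
        else score) 0

-- ===== PORT B =====
-- literal port of Source B: collect the distinct lengths of non-blank keywords (dedup
-- list, insertion order), build the set 'seen' of all windows text[i:i+L] for each
-- such length L (windows held as List Char: Python string slices, compared by value),
-- then score each keyword by set membership
def score_match_phrase_alt (text : String) (keywords : List String) : Int :=
  if text = "" ∨ keywords = [] then 0
  else
    let lengths : List Int := keywords.foldl
      (fun acc kw =>
        if PySem.Str.strip kw ≠ "" ∧ PySem.Str.len kw ∉ acc then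
          acc ++ [PySem.Str.len kw]
        else acc) []
    let seen : PySem.Set (List Char) := lengths.foldl
      (fun s L =>
        (PySem.List.pyRange 0 (PySem.Str.len text - L + 1) 1).foldl
          (fun s i => s.add (PySem.List.slice text.toList (some i) (some (i + L)))) s)
      []
    keywords.foldl
      (fun score kw =>
        if PySem.Str.strip kw ≠ "" ∧ PySem.Set.contains seen kw.toList = true then
          score + (10 + PySem.Str.len kw)
        else score) 0

-- ===== PRECONDITION & SPEC =====
def Spec_score_match_phrase (text : String) (keywords : List String) (out : Int) : Prop := out = score_match_phrase_alt text keywords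
instance (text : String) (keywords : List String) (out : Int) : Decidable (Spec_score_match_phrase text keywords out) := by unfold Spec_score_match_phrase; infer_instance

-- ===== CLAIM (what is proved, stated in full; the proofs are below) =====
def Claim_equal_score_match_phrase : Prop := ∀ (text : String) (keywords : List String), Dom_score_match_phrase text keywords → Spec_score_match_phrase text keywords (score_match_phrase text keywords)

-- ===== LEMMAS AND PROOFS =====

-- abbreviations (proof-side only) for the two intermediate structures of B
def pvLengths (keywords : List String) : List Int :=
  keywords.foldl
    (fun acc kw =>
      if PySem.Str.strip kw ≠ "" ∧ PySem.Str.len kw ∉ acc then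
        acc ++ [PySem.Str.len kw]
      else acc) []

def pvSeen (text : String) (keywords : List String) : PySem.Set (List Char) :=
  (pvLengths keywords).foldl
    (fun s L =>
      (PySem.List.pyRange 0 (PySem.Str.len text - L + 1) 1).foldl
        (fun s i => s.add (PySem.List.slice text.toList (some i) (some (i + L)))) s)
    []

theorem pv_len_nonneg (s : String) : 0 ≤ PySem.Str.len s := by
  simp [PySem.Str.len_eq]

-- every member of the lengths accumulator is an old member or some keyword's length
theorem pv_mem_lengths_fold (l : List String) (acc : List Int) (L : Int)
    (h : L ∈ l.foldl
      (fun acc kw =>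
        if PySem.Str.strip kw ≠ "" ∧ PySem.Str.len kw ∉ acc then
          acc ++ [PySem.Str.len kw]
        else acc) acc) :
    L ∈ acc ∨ ∃ kw ∈ l, L = PySem.Str.len kw := by
  induction l generalizing acc with
  | nil => simp_all
  | cons k t ih =>
    simp only [List.foldl_cons] at h
    rcases ih _ h with hm | ⟨kw, hkw, rfl⟩
    · by_cases hc : PySem.Str.strip k ≠ "" ∧ PySem.Str.len k ∉ acc
      · simp only [if_pos hc, List.mem_append, List.mem_singleton] at hm
        rcases hm with hm | rfl
        · exact Or.inl hm
        · exact Or.inr ⟨k, by simp⟩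
      · simp only [if_neg hc] at hm
        exact Or.inl hm
    · exact Or.inr ⟨kw, List.mem_cons_of_mem _ hkw, rfl⟩

theorem pv_lengths_nonneg (keywords : List String) : ∀ L ∈ pvLengths keywords, 0 ≤ L := by
  intro L hL
  rcases pv_mem_lengths_fold keywords [] L hL with h | ⟨kw, _, rfl⟩
  · simp at h
  · exact pv_len_nonneg kw

-- the length of every non-blank keyword makes it into the lengths list
theorem pv_len_mem_lengths_fold (l : List String) (kw : String)
    (hs : PySem.Str.strip kw ≠ "") :
    ∀ acc : List Int, (PySem.Str.len kw ∈ acc ∨ kw ∈ l) →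
      PySem.Str.len kw ∈ l.foldl
        (fun acc kw =>
          if PySem.Str.strip kw ≠ "" ∧ PySem.Str.len kw ∉ acc then
            acc ++ [PySem.Str.len kw]
          else acc) acc := by
  induction l with
  | nil => intro acc h; simpa using h
  | cons k t ih =>
    intro acc h
    simp only [List.foldl_cons]
    apply ih
    rcases h with hm | hmem
    · left
      split_ifs with hc
      · exact List.mem_append_left _ hm
      · exact hm
    · rcases List.mem_cons.mp hmem with rfl | ht
      · left
        by_cases hin : PySem.Str.len kw ∈ acc
        · split_ifs with hc
          · exact List.mem_append_left _ hin
          · exact hin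
        · rw [if_pos ⟨hs, hin⟩]
          simp
      · exact Or.inr ht

theorem pv_len_mem_lengths (keywords : List String) (kw : String)
    (hkw : kw ∈ keywords) (hs : PySem.Str.strip kw ≠ "") :
    PySem.Str.len kw ∈ pvLengths keywords :=
  pv_len_mem_lengths_fold keywords kw hs [] (Or.inr hkw)

-- membership in the accumulated window set
theorem pv_mem_seen_fold (text : String) (l : List Int) (s : PySem.Set (List Char))
    (x : List Char) :
    x ∈ l.foldl
      (fun s L =>
        (PySem.List.pyRange 0 (PySem.Str.len text - L + 1) 1).foldl
          (fun s i => s.add (PySem.List.slice text.toList (some i) (some (i + L)))) s) s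
    ↔ x ∈ s ∨ ∃ L ∈ l, ∃ i : Int, 0 ≤ i ∧ i < PySem.Str.len text - L + 1 ∧
        x = PySem.List.slice text.toList (some i) (some (i + L)) := by
  induction l generalizing s with
  | nil => simp
  | cons L t ih =>
    simp only [List.foldl_cons]
    rw [ih]
    rw [PySem.Set.mem_foldl_add]
    constructor
    · rintro (⟨hx | ⟨i, hi, rfl⟩⟩ | ⟨L', hL', hw⟩)
      · exact Or.inl hx
      · rcases PySem.List.mem_pyRange_one.mp hi with ⟨h0, h1⟩
        exact Or.inr ⟨L, List.mem_cons_self .., i, h0, h1, rfl⟩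
      · exact Or.inr ⟨L', List.mem_cons_of_mem _ hL', hw⟩
    · rintro (hx | ⟨L', hL', i, h0, h1, rfl⟩)
      · exact Or.inl (Or.inl hx)
      · rcases List.mem_cons.mp hL' with rfl | ht
        · exact Or.inl (Or.inr ⟨i, PySem.List.mem_pyRange_one.mpr ⟨h0, h1⟩, rfl⟩)
        · exact Or.inr ⟨L', ht, i, h0, h1, rfl⟩

theorem pv_mem_seen (text : String) (keywords : List String) (x : List Char) :
    x ∈ pvSeen text keywords ↔
      ∃ L ∈ pvLengths keywords, ∃ i : Int, 0 ≤ i ∧ i < PySem.Str.len text - L + 1 ∧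
        x = PySem.List.slice text.toList (some i) (some (i + L)) := by
  unfold pvSeen
  rw [pv_mem_seen_fold]
  simp

-- forward: every window in the set is a substring of the text
theorem pv_seen_isIn (text : String) (keywords : List String) (x : List Char)
    (hx : x ∈ pvSeen text keywords) : PySem.Chars.isIn x text.toList = true := by
  rcases (pv_mem_seen text keywords x).mp hx with ⟨L, hL, i, h0, _, rfl⟩
  have hLn : 0 ≤ L := pv_lengths_nonneg keywords L hL
  rw [PySem.List.slice_toNat _ h0 (by omega)]
  apply (PySem.Chars.exists_prefix_drop_iff_isIn _ _).mp
  exact ⟨i.toNat, List.take_prefix _ _⟩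

-- backward: every non-blank keyword occurring in the text is a window in the set
theorem pv_isIn_seen (text : String) (keywords : List String) (kw : String)
    (hkw : kw ∈ keywords) (hs : PySem.Str.strip kw ≠ "")
    (hin : PySem.Chars.isIn kw.toList text.toList = true) :
    kw.toList ∈ pvSeen text keywords := by
  rcases (PySem.Chars.exists_prefix_drop_iff_isIn _ _).mpr hin with ⟨j0, hpre0⟩
  have H : ∃ j, j ≤ text.toList.length ∧ kw.toList <+: text.toList.drop j := by
    by_cases hj : j0 ≤ text.toList.length
    · exact ⟨j0, hj, hpre0⟩
    · have hd : text.toList.drop j0 = [] := List.drop_eq_nil_of_le (by omega)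
      have hnil : kw.toList = [] := List.prefix_nil.mp (hd ▸ hpre0)
      exact ⟨0, Nat.zero_le _, by simp [hnil]⟩
  obtain ⟨j, hjn, hpre⟩ := H
  have hlen : kw.toList.length ≤ text.toList.length - j := by
    have := hpre.length_le
    simpa using this
  have hjle : j + kw.toList.length ≤ text.toList.length := by omega
  apply (pv_mem_seen text keywords kw.toList).mpr
  refine ⟨PySem.Str.len kw, pv_len_mem_lengths keywords kw hkw hs, (j : Int), by omega, ?_, ?_⟩
  · rw [PySem.Str.len_eq, PySem.Str.len_eq]
    omega
  · rw [PySem.Str.len_eq]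
    rw [show ((j : Int) + (kw.toList.length : Int)) = ((j + kw.toList.length : Nat) : Int) by push_cast; ring]
    rw [PySem.List.slice_toNat _ (by omega) (by omega)]
    simp only [Int.toNat_natCast]
    rw [Nat.add_sub_cancel_left]
    exact List.prefix_iff_eq_take.mp hpre

-- ===== VERDICT (by name: the statement is the Claim_ definition above) =====
theorem score_match_phrase_spec : Claim_equal_score_match_phrase := by
  unfold Claim_equal_score_match_phrase
  intro text keywords _
  unfold Spec_score_match_phrase score_match_phrase score_match_phrase_alt
  by_cases hbase : text = "" ∨ keywords = []
  · rw [if_pos hbase, if_pos hbase]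
  · rw [if_neg hbase, if_neg hbase]
    apply PySem.List.foldl_congr_mem
    intro acc kw hkw
    apply if_congr _ rfl rfl
    constructor
    · rintro ⟨hs, hin⟩
      refine ⟨hs, ?_⟩
      rw [PySem.Set.contains_iff]
      apply pv_isIn_seen text keywords kw hkw hs
      rw [PySem.Str.isIn_eq] at hin
      exact hin
    · rintro ⟨hs, hmem⟩
      refine ⟨hs, ?_⟩
      rw [PySem.Set.contains_iff] at hmem
      rw [PySem.Str.isIn_eq]
      exact pv_seen_isIn text keywords kw.toList hmem
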